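-- pv_equiv track=rewrite | github.com/afifahfq/Tubes3Stima | src/FileProcessing.py | remove_noise
-- ===== SOURCE A (Python) =====
-- import string
--
-- def remove_noise(line, notNoise=list(string.ascii_letters)+list(string.digits)+list(string.whitespace)):
--     hasil = line
--     i = 0
--
--     for char in line:
--         if char not in notNoise:
--             hasil = hasil[:i] + " " + hasil[i+1:]
--         i += 1
--
--     return "".join(hasil)
-- ===== SOURCE B (Python) =====
-- import string
--
-- def remove_noise(line, notNoise=list(string.ascii_letters)+list(string.digits)+list(string.whitespace)):
--     allowed = frozenset(notNoise)
--     return "".join(c if c in allowed else " " for c in line)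
-- ===== Notes on version B (the rewrite author's own statement) =====
-- stated objective: faster
-- what changed: Replaces A's per-index slice-and-concatenate rebuilding of the whole string (quadratic) with a single join over a generator using a frozenset membership test.
import Mathlib
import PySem

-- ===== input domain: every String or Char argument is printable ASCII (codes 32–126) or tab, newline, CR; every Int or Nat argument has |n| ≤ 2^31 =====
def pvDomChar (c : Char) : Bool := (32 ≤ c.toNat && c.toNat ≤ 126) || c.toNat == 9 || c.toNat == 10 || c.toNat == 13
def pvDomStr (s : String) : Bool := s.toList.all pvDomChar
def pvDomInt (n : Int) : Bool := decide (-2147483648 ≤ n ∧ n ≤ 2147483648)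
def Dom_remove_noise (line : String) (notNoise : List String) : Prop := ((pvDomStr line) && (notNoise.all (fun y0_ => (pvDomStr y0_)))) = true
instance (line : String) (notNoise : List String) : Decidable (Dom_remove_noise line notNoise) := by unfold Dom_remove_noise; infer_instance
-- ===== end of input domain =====

-- B replaces A's per-index slice-and-concatenate string rebuilding with one map over the
-- characters using a set for membership (return value only; neither version mutates arguments).

-- ===== PORT A =====
-- A: hasil = line; for char in line: if char not in notNoise: hasil = hasil[:i] + " " + hasil[i+1:]; i += 1
-- ported over List Char (strings via toList); slices via PySem.List.slice (exact).
def remove_noise (line : String) (notNoise : List String) : String :=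
  let step : (List Char × Nat) → Char → (List Char × Nat) := fun st char =>
    let hasil := st.1
    let i := st.2
    let hasil :=
      if ¬ (String.mk [char] ∈ notNoise) then
        PySem.List.slice hasil none (some (i : Int)) ++ [' ']
          ++ PySem.List.slice hasil (some ((i : Int) + 1)) none
      else hasil
    (hasil, i + 1)
  String.mk (line.toList.foldl step (line.toList, 0)).1

-- ===== PORT B =====
def remove_noise_alt (line : String) (notNoise : List String) : String :=
  let allowed : PySem.Set String := PySem.Set.ofList notNoise
  String.mk (line.toList.map (fun c =>
    if PySem.Set.contains allowed (String.mk [c]) then c else ' '))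

-- ===== PRECONDITION & SPEC =====
def Spec_remove_noise (line : String) (notNoise : List String) (out : String) : Prop := out = remove_noise_alt line notNoise
instance (line : String) (notNoise : List String) (out : String) : Decidable (Spec_remove_noise line notNoise out) := by unfold Spec_remove_noise; infer_instance

-- ===== CLAIM (what is proved, stated in full; the proofs are below) =====
def Claim_equal_remove_noise : Prop := ∀ (line : String) (notNoise : List String), Dom_remove_noise line notNoise → Spec_remove_noise line notNoise (remove_noise line notNoise)

-- ===== LEMMAS AND PROOFS =====

theorem mem_ofList_iff {α : Type} [BEq α] [LawfulBEq α] (xs : List α) (x : α) :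
    PySem.Set.contains (PySem.Set.ofList xs) x = true ↔ x ∈ xs := by
  simp [PySem.Set.mem_ofList]

theorem remove_noise_invariant (notNoise : List String)
    (f : Char → Char)
    (hf : f = fun c => if PySem.Set.contains (PySem.Set.ofList notNoise) (String.mk [c]) then c else ' ')
    (step : (List Char × Nat) → Char → (List Char × Nat))
    (hstep : step = fun (st : List Char × Nat) char =>
      let hasil := st.1
      let i := st.2
      let hasil :=
        if ¬ (String.mk [char] ∈ notNoise) then
          PySem.List.slice hasil none (some (i : Int)) ++ [' ']
            ++ PySem.List.slice hasil (some ((i : Int) + 1)) none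
        else hasil
      (hasil, i + 1)) :
    ∀ (suf done : List Char),
      (suf.foldl step (done ++ suf, done.length)).1 = done ++ suf.map f := by
  intro suf
  induction suf with
  | nil => intro done; simp
  | cons c cs ih =>
    intro done
    have hmem : PySem.Set.contains (PySem.Set.ofList notNoise) (String.mk [c]) = true
        ↔ String.mk [c] ∈ notNoise := mem_ofList_iff notNoise (String.mk [c])
    by_cases h : String.mk [c] ∈ notNoise
    · have hstep1 : step (done ++ c :: cs, done.length) c = (done ++ c :: cs, done.length + 1) := by
        simp [hstep, h]
      have hfc : f c = c := by simp only [hf]; rw [if_pos (hmem.mpr h)]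
      have := ih (done ++ [c])
      simpa [List.foldl_cons, hstep1, hfc,
        show done ++ [c] ++ cs = done ++ c :: cs by simp,
        show (done ++ [c]).length = done.length + 1 by simp] using this
    · have htake : PySem.List.slice (done ++ c :: cs) none (some ((done.length : Nat) : Int)) = done := by
        rw [PySem.List.slice_to_natCast]
        simpa using List.take_left done (c :: cs)
      have hdrop : PySem.List.slice (done ++ c :: cs) (some (((done.length : Nat) : Int) + 1)) none = cs := by
        have : ((done.length : Nat) : Int) + 1 = ((done.length + 1 : Nat) : Int) := by push_cast; ring
        rw [this, PySem.List.slice_from_natCast]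
        have : done ++ c :: cs = (done ++ [c]) ++ cs := by simp
        rw [this]
        simpa using List.drop_left (done ++ [c]) cs
      have hstep1 : step (done ++ c :: cs, done.length) c
          = (done ++ [' '] ++ cs, done.length + 1) := by
        simp [hstep, h, htake, hdrop]
      have hfc : f c = ' ' := by
        simp only [hf]
        rw [if_neg]
        intro hcon
        exact h (hmem.mp hcon)
      have := ih (done ++ [' '])
      simp only [List.foldl_cons, hstep1]
      rw [show done ++ [' '] ++ cs = (done ++ [' ']) ++ cs by simp] at *
      simpa [hfc, show (done ++ [' ']).length = done.length + 1 by simp] using this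

-- ===== VERDICT (by name: the statement is the Claim_ definition above) =====
theorem remove_noise_spec : Claim_equal_remove_noise := by
  intro line notNoise _
  show remove_noise line notNoise = remove_noise_alt line notNoise
  have h := remove_noise_invariant notNoise _ rfl _ rfl line.toList []
  simp only [List.nil_append, List.length_nil] at h
  exact congrArg String.mk h
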